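-- pv_equiv track=rewrite | github.com/edoriggio/algorithms-and-data-structures | dp/two_primes.py | two_primes
-- ===== SOURCE A (Python) =====
-- def two_primes(number):
--     # Complexity: O(n^2)
--     primes = find_primes(number)
--
--     if primes[-1] == number:
--         del primes[-1]
--
--     x = [0] * (number+1)
--     DP = []
--
--     # Complexity: O(n * len(primes))
--     for _ in range(len(primes)+1):
--         DP.append(x[:])
--
--     for i in range(1, number+1):
--         for j in range(1, len(x)):
--             if i-1 >= len(primes):
--                 return DP[-1][-1] == number
--
--             if j >= primes[i-1]:
--                 DP[i][j] = max(DP[i-1][j], primes[i-1] +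
--                                DP[i-1][j - primes[i-1]])
--             else:
--                 DP[i][j] = DP[i-1][j]
--
-- def find_primes(number):
--     primes = []
--
--     for i in range(2, number+1):
--         is_prime = True
--
--         for j in range(2, i):
--             if i % j == 0:
--                 is_prime = False
--                 break
--
--         if is_prime:
--             primes.append(i)
--
--     return primes
-- ===== SOURCE B (Python) =====
-- def two_primes(number):
--     # A number n is a sum of distinct primes taken from the primes below n
--     # (the target itself is excluded by A's `del primes[-1]`) iff
--     # n in {5, 7, 8, 9, 10} or n >= 12 -- a consequence of Richert's theorem
--     # (every integer >= 7 is a sum of distinct primes; excluding n itself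
--     # only shifts the finite exceptional set).  O(1) closed form.
--     return number == 5 or 7 <= number <= 10 or number >= 12
-- ===== Notes on version B (the rewrite author's own statement) =====
-- stated objective: faster
-- what changed: Replaces trial-division prime generation plus a 2D knapsack DP with the O(1) closed form justified by Richert's theorem: n is a sum of distinct primes below n iff n is 5, 7-10, or at least 12.
import Mathlib
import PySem

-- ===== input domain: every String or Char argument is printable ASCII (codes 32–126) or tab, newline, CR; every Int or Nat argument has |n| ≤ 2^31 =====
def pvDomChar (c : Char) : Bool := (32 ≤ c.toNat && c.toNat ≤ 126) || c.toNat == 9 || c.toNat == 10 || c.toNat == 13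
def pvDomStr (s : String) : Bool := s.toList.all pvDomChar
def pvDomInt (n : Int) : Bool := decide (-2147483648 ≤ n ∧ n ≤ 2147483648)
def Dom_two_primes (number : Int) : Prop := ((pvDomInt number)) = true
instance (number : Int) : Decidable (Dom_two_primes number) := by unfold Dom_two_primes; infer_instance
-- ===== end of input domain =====

-- B replaces A's trial-division prime list + 2D knapsack DP by the O(1) closed
-- form justified by Richert's theorem (objective: faster).

-- ===== PORT A =====

-- inner trial-division loop of find_primes (`for j in range(2, i): if i % j == 0: break`)
def fpInner (i : Int) : List Int → Bool
  | [] => true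
  | j :: js => if PySem.Int.mod i j == 0 then false else fpInner i js

def find_primes (number : Int) : List Int :=
  (PySem.List.pyRange 2 (number + 1) 1).foldl
    (fun primes i =>
      if fpInner i (PySem.List.pyRange 2 i 1) then primes ++ [i] else primes) []

-- list reads `l[k]` / `DP[k]`; every use below is at an in-range index
def pgI (l : List Int) (k : Int) : Int := (PySem.List.pyGet? l k).getD 0
def pgR (d : List (List Int)) (k : Int) : List Int := (PySem.List.pyGet? d k).getD []

-- `DP[i][j] = v`
def setDP (DP : List (List Int)) (i j : Int) (v : Int) : List (List Int) :=
  PySem.List.pySetD DP i (PySem.List.pySetD (pgR DP i) j v)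

-- inner `for j in range(1, len(x))` loop; `Sum.inr` is the early `return`
def rowLoop (primes : List Int) (number i : Int) (DP : List (List Int)) :
    List Int → List (List Int) ⊕ Bool
  | [] => Sum.inl DP
  | j :: js =>
    if (primes.length : Int) ≤ i - 1 then
      Sum.inr (pgI (pgR DP (-1)) (-1) == number)
    else
      let p := pgI primes (i - 1)
      let v := if p ≤ j then max (pgI (pgR DP (i - 1)) j) (p + pgI (pgR DP (i - 1)) (j - p))
               else pgI (pgR DP (i - 1)) j
      rowLoop primes number i (setDP DP i j v) js

-- outer `for i in range(1, number+1)` loop; `none` = the Python falls off and returns None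
def outerLoop (primes : List Int) (number : Int) (x : List Int) (DP : List (List Int)) :
    List Int → Option Bool
  | [] => none
  | i :: is =>
    match rowLoop primes number i DP (PySem.List.pyRange 1 (x.length : Int) 1) with
    | Sum.inr b => some b
    | Sum.inl DP' => outerLoop primes number x DP' is

def two_primes (number : Int) : Bool :=
  let primes0 := find_primes number
  match PySem.List.pyGet? primes0 (-1) with
  | none => false   -- Python raises IndexError on `primes[-1]` here (number < 2; excluded by Pre_)
  | some last =>
    let primes := if last == number then primes0.dropLast else primes0
    let x : List Int := List.replicate (number + 1).toNat 0
    let DP := (PySem.List.pyRange 0 ((primes.length : Int) + 1) 1).foldl (fun d _ => d ++ [x]) []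
    (outerLoop primes number x DP (PySem.List.pyRange 1 (number + 1) 1)).getD false
    -- `.getD false`: Python returns None only if the outer loop completes,
    -- which never happens for number ≥ 2 (proved below); never reached under Pre_

-- ===== PORT B =====
def two_primes_alt (number : Int) : Bool :=
  (number == 5) || (decide (7 ≤ number) && decide (number ≤ 10)) || decide (12 ≤ number)

-- ===== PRECONDITION & SPEC =====
-- Pre_ excludes number < 2, where find_primes returns [] and A raises IndexError on primes[-1].
def Pre_two_primes (number : Int) : Prop := 2 ≤ number
instance (number : Int) : Decidable (Pre_two_primes number) := by unfold Pre_two_primes; infer_instance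
def pvWitness_two_primes : Int := 7

def Spec_two_primes (number : Int) (out : Bool) : Prop := out = two_primes_alt number
instance (number : Int) (out : Bool) : Decidable (Spec_two_primes number out) := by unfold Spec_two_primes; infer_instance

-- ===== CLAIM (what is proved, stated in full; the proofs are below) =====
def Claim_equal_two_primes : Prop := ∀ (number : Int), Dom_two_primes number → Pre_two_primes number → Spec_two_primes number (two_primes number)

-- ===== LEMMAS AND PROOFS =====

-- ---- the abstract DP table: Efun P i j = DP[i][j] after row i is filled ----
def Efun (P : List Int) : ℕ → ℕ → Int
  | 0, _ => 0
  | i + 1, j =>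
    let p := pgI P (i : Int)
    if p ≤ (j : Int) then max (Efun P i j) (p + Efun P i ((j : Int) - p).toNat)
    else Efun P i j

def NN (n : Int) : ℕ := (n + 1).toNat
def rowL (P : List Int) (n : Int) (i : ℕ) : List Int := (List.range (NN n)).map (Efun P i)
def mixRow (P : List Int) (n : Int) (i j0 : ℕ) : List Int :=
  (List.range (NN n)).map (fun j => if j < j0 then Efun P i j else 0)

theorem pgI_natCast (l : List Int) (k : ℕ) : pgI l (k : Int) = l.getD k 0 := by
  simp [pgI, PySem.List.pyGet?_natCast, List.getD_eq_getElem?_getD]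

theorem pgR_natCast (d : List (List Int)) (k : ℕ) : pgR d (k : Int) = d.getD k [] := by
  simp [pgR, PySem.List.pyGet?_natCast, List.getD_eq_getElem?_getD]

theorem pgI_map_range (f : ℕ → Int) (N : ℕ) (k : Int) (h0 : 0 ≤ k) (h : k.toNat < N) :
    pgI ((List.range N).map f) k = f k.toNat := by
  have hk : k = ((k.toNat : ℕ) : Int) := (Int.toNat_of_nonneg h0).symm
  rw [hk, pgI_natCast]
  simp [List.getD_eq_getElem?_getD, h]
  congr 1
  omega

theorem pgI_cases (P : List Int) (HP2 : ∀ p ∈ P, 2 ≤ p) (i : ℕ) :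
    pgI P (i : Int) = 0 ∨ 2 ≤ pgI P (i : Int) := by
  rw [pgI_natCast]
  by_cases h : i < P.length
  · right
    rw [List.getD_eq_getElem P 0 h]
    exact HP2 _ (List.getElem_mem _)
  · left
    exact List.getD_eq_default P 0 (by omega)

theorem Efun_zero_col (P : List Int) (HP2 : ∀ p ∈ P, 2 ≤ p) : ∀ i, Efun P i 0 = 0 := by
  intro i
  induction i with
  | zero => simp [Efun]
  | succ i ih =>
    simp only [Efun]
    rcases pgI_cases P HP2 i with h0 | h2
    · simp [h0, ih]
    · rw [if_neg (by omega)]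
      exact ih

theorem Efun_le (P : List Int) : ∀ i j, Efun P i j ≤ (j : Int) := by
  intro i
  induction i with
  | zero => intro j; simp [Efun]
  | succ i ih =>
    intro j
    simp only [Efun]
    split_ifs with hp
    · apply max_le (ih j)
      have h2 := ih (((j : Int) - pgI P i).toNat)
      have h3 : ((((j : Int) - pgI P i).toNat : ℕ) : Int) = (j : Int) - pgI P i :=
        Int.toNat_of_nonneg (by omega)
      omega
    · exact ih j

theorem Efun_ge_sum (P : List Int) (HP2 : ∀ p ∈ P, 2 ≤ p) :
    ∀ (i : ℕ) (S : List Int) (j : ℕ), S.Sublist (P.take i) → S.sum ≤ (j : Int) →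
      S.sum ≤ Efun P i j := by
  intro i
  induction i with
  | zero =>
    intro S j hS hle
    rw [List.take_zero, List.sublist_nil] at hS
    simp [hS, Efun]
  | succ i ih =>
    intro S j hS hle
    by_cases hi : i < P.length
    · rw [List.take_add_one, List.getElem?_eq_getElem hi] at hS
      rcases List.sublist_append_iff.mp hS with ⟨S₁, S₂, rfl, hS₁, hS₂⟩
      have hp : pgI P (i : Int) = P[i] := by
        rw [pgI_natCast]; exact List.getD_eq_getElem P 0 hi
      rcases List.sublist_singleton.mp (by simpa using hS₂) with rfl | rfl
      · simp only [List.append_nil] at hle ⊢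
        have := ih S₁ j hS₁ hle
        simp only [Efun]
        split_ifs with h
        · exact le_trans this (le_max_left _ _)
        · exact this
      · have hS1nn : 0 ≤ S₁.sum := by
          apply List.sum_nonneg
          intro x hx
          have : x ∈ P := List.mem_of_mem_take (hS₁.subset hx)
          have := HP2 x this
          omega
        have hsum : (S₁ ++ [P[i]]).sum = S₁.sum + P[i] := by simp
        rw [hsum] at hle ⊢
        have hPi2 : 2 ≤ P[i] := HP2 _ (List.getElem_mem _)
        have hpj : P[i] ≤ (j : Int) := by omega
        simp only [Efun, hp]
        rw [if_pos hpj]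
        have hcast : ((((j : Int) - P[i]).toNat : ℕ) : Int) = (j : Int) - P[i] :=
          Int.toNat_of_nonneg (by omega)
        have := ih S₁ (((j : Int) - P[i]).toNat) hS₁ (by omega)
        have : S₁.sum + P[i] ≤ P[i] + Efun P i (((j : Int) - P[i]).toNat) := by omega
        exact le_trans this (le_max_right _ _)
    · have htake : P.take (i + 1) = P.take i := by
        rw [List.take_of_length_le (by omega), List.take_of_length_le (by omega)]
      rw [htake] at hS
      have := ih S j hS hle
      simp only [Efun]
      split_ifs with h
      · exact le_trans this (le_max_left _ _)
      · exact this

theorem list_set_self {α : Type} (l : List α) (i : ℕ) (a : α) (h : l[i]? = some a) :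
    l.set i a = l := by
  apply List.ext_getElem?
  intro n
  by_cases hn : i = n
  · subst hn
    obtain ⟨hlt, _⟩ := List.getElem?_eq_some_iff.mp h
    rw [List.getElem?_set_self hlt, h]
  · rw [List.getElem?_set_ne hn]

theorem mixRow_last (P : List Int) (n : Int) (i : ℕ) : mixRow P n i (NN n) = rowL P n i := by
  apply List.map_congr_left
  intro j hj
  rw [List.mem_range] at hj
  simp [hj]

theorem mixRow_one (P : List Int) (n : Int) (HP2 : ∀ p ∈ P, 2 ≤ p) (i : ℕ) :
    mixRow P n i 1 = rowL P n 0 := by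
  apply List.map_congr_left
  intro j _
  by_cases hj : j < 1
  · have : j = 0 := by omega
    subst this
    simp [Efun_zero_col P HP2 i, Efun]
  · rw [if_neg hj]
    simp [Efun]

theorem mixRow_set (P : List Int) (n : Int) (i j0 : ℕ) (h : j0 < NN n) :
    (mixRow P n i j0).set j0 (Efun P i j0) = mixRow P n i (j0 + 1) := by
  apply List.ext_getElem?
  intro m
  by_cases hm : j0 = m
  · subst hm
    have hls : j0 < (mixRow P n i j0).length := by simp [mixRow, h]
    rw [List.getElem?_set_self hls]
    simp [mixRow, List.getElem?_range h]
  · rw [List.getElem?_set_ne hm]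
    by_cases hmN : m < NN n
    · simp only [mixRow, List.getElem?_map, List.getElem?_range hmN, Option.map_some]
      have hiff : (m < j0) ↔ (m < j0 + 1) := by omega
      simp [hiff]
    · rw [List.getElem?_eq_none (by simp [mixRow]; omega),
          List.getElem?_eq_none (by simp [mixRow]; omega)]

theorem rowLoop_cons (P : List Int) (num i j : Int) (js : List Int) (DP : List (List Int))
    (h : ¬ ((P.length : Int) ≤ i - 1)) :
    rowLoop P num i DP (j :: js) =
      rowLoop P num i (setDP DP i j
        (if pgI P (i - 1) ≤ j
         then max (pgI (pgR DP (i - 1)) j) (pgI P (i - 1) + pgI (pgR DP (i - 1)) (j - pgI P (i - 1)))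
         else pgI (pgR DP (i - 1)) j)) js := by
  simp only [rowLoop]
  rw [if_neg h]

theorem Efun_succ_eq (P : List Int) (i : ℕ) (hi : 1 ≤ i) (jc : Int) (hjc : 0 ≤ jc) :
    Efun P i jc.toNat =
      if pgI P ((i : Int) - 1) ≤ jc
      then max (Efun P (i - 1) jc.toNat)
               (pgI P ((i : Int) - 1) + Efun P (i - 1) ((jc - pgI P ((i : Int) - 1)).toNat))
      else Efun P (i - 1) jc.toNat := by
  obtain ⟨i', rfl⟩ : ∃ i', i = i' + 1 := ⟨i - 1, by omega⟩
  simp only [Efun, Nat.add_sub_cancel]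
  have h1 : ((i' + 1 : ℕ) : Int) - 1 = (i' : Int) := by push_cast; ring
  have h2 : ((jc.toNat : ℕ) : Int) = jc := Int.toNat_of_nonneg hjc
  rw [h1, h2]

theorem rowLoop_fill (P : List Int) (num n : Int) (i : ℕ)
    (hi1 : 1 ≤ i) (hiP : i ≤ P.length) (HP2 : ∀ p ∈ P, 2 ≤ p) :
    ∀ (c : ℕ) (jc : Int) (DP : List (List Int)),
      1 ≤ jc → jc + c = n + 1 →
      DP.length = P.length + 1 →
      DP[i - 1]? = some (rowL P n (i - 1)) →
      DP[i]? = some (mixRow P n i jc.toNat) →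
      rowLoop P num (i : Int) DP (PySem.List.pyRange jc (n + 1) 1) =
        Sum.inl (DP.set i (rowL P n i)) := by
  intro c
  induction c with
  | zero =>
    intro jc DP h1 hsum hlen hprev hcur
    have hjc : jc = n + 1 := by omega
    subst hjc
    rw [PySem.List.pyRange_one_eq_nil (le_refl _)]
    simp only [rowLoop]
    have hNN : (n + 1 : Int).toNat = NN n := rfl
    rw [hNN, mixRow_last] at hcur
    rw [list_set_self DP i _ hcur]
  | succ c ih =>
    intro jc DP h1 hsum hlen hprev hcur
    have hc : (c + 1 : ℕ) = ((c : Int) + 1).toNat := by omega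
    have hjcn : jc < n + 1 := by omega
    rw [PySem.List.pyRange_one_cons hjcn]
    rw [rowLoop_cons P num _ _ _ _ (by omega)]
    have hiI : ((i : Int) - 1) = ((i - 1 : ℕ) : Int) := by omega
    have hi1l : i - 1 < P.length := by omega
    have hp : pgI P ((i : Int) - 1) = P[i - 1] := by
      rw [hiI, pgI_natCast]; exact List.getD_eq_getElem P 0 hi1l
    have hp2 : (2 : Int) ≤ P[i - 1] := HP2 _ (List.getElem_mem _)
    have hprevR : pgR DP ((i : Int) - 1) = rowL P n (i - 1) := by
      rw [hiI, pgR_natCast, List.getD_eq_getElem?_getD, hprev]; rfl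
    have hcurR : pgR DP (i : Int) = mixRow P n i jc.toNat := by
      rw [pgR_natCast, List.getD_eq_getElem?_getD, hcur]; rfl
    have hjcNN : jc.toNat < NN n := by unfold NN; omega
    have hread1 : pgI (rowL P n (i - 1)) jc = Efun P (i - 1) jc.toNat :=
      pgI_map_range _ _ _ (by omega) hjcNN
    have hv : (if pgI P ((i : Int) - 1) ≤ jc
         then max (pgI (pgR DP ((i : Int) - 1)) jc)
                  (pgI P ((i : Int) - 1) + pgI (pgR DP ((i : Int) - 1)) (jc - pgI P ((i : Int) - 1)))
         else pgI (pgR DP ((i : Int) - 1)) jc) = Efun P i jc.toNat := by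
      rw [Efun_succ_eq P i hi1 jc (by omega), hprevR, hread1]
      by_cases hpi : pgI P ((i : Int) - 1) ≤ jc
      · rw [if_pos hpi, if_pos hpi]
        have hread2 : pgI (rowL P n (i - 1)) (jc - pgI P ((i : Int) - 1)) =
            Efun P (i - 1) ((jc - pgI P ((i : Int) - 1)).toNat) := by
          apply pgI_map_range _ _ _ (by omega)
          rw [hp] at hpi ⊢
          unfold NN
          omega
        rw [hread2]
      · rw [if_neg hpi, if_neg hpi]
    rw [hv]
    have hset : setDP DP (i : Int) jc (Efun P i jc.toNat) =
        DP.set i (mixRow P n i (jc.toNat + 1)) := by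
      unfold setDP
      rw [hcurR]
      have hjcc : jc = ((jc.toNat : ℕ) : Int) := (Int.toNat_of_nonneg (by omega)).symm
      rw [hjcc, PySem.List.pySetD_natCast, PySem.List.pySetD_natCast]
      simp only [Int.toNat_natCast]
      rw [mixRow_set P n i jc.toNat hjcNN]
    rw [hset]
    have hnext := ih (jc + 1) (DP.set i (mixRow P n i (jc.toNat + 1)))
      (by omega) (by push_cast at hsum ⊢; omega)
      (by simp [hlen])
      (by rw [List.getElem?_set_ne (by omega : i ≠ i - 1)]; exact hprev)
      (by rw [List.getElem?_set_self (by omega : i < DP.length)]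
          congr 2
          omega)
    rw [hnext, List.set_set]

theorem outer_fill (P : List Int) (n : Int) (HP2 : ∀ p ∈ P, 2 ≤ p) (hn : 2 ≤ n)
    (hPn : (P.length : Int) + 1 ≤ n) :
    ∀ (c k : ℕ) (DP : List (List Int)), k + c = P.length →
      DP.length = P.length + 1 →
      DP[k]? = some (rowL P n k) →
      (∀ t, k < t → t ≤ P.length → DP[t]? = some (rowL P n 0)) →
      outerLoop P n (List.replicate (NN n) 0) DP (PySem.List.pyRange ((k : Int) + 1) (n + 1) 1) =
        some (Efun P P.length n.toNat == n) := by
  intro c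
  induction c with
  | zero =>
    intro k DP hk hlen hrow hrest
    have hkP : k = P.length := by omega
    subst hkP
    rw [PySem.List.pyRange_one_cons (by omega : (P.length : Int) + 1 < n + 1)]
    simp only [outerLoop]
    have hxlen : (((List.replicate (NN n) (0 : Int)).length : ℕ) : Int) = n + 1 := by
      simp [NN]; omega
    rw [hxlen]
    rw [PySem.List.pyRange_one_cons (by omega : (1 : Int) < n + 1)]
    simp only [rowLoop]
    rw [if_pos (by omega : (P.length : Int) ≤ (P.length : Int) + 1 - 1)]
    have hgetlast : pgR DP (-1) = rowL P n P.length := by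
      unfold pgR
      rw [PySem.List.pyGet?_neg_one, List.getLast?_eq_getElem?, hlen,
          Nat.add_sub_cancel, hrow]
      rfl
    rw [hgetlast]
    have hlast2 : pgI (rowL P n P.length) (-1) = Efun P P.length n.toNat := by
      unfold pgI
      rw [PySem.List.pyGet?_neg_one, List.getLast?_eq_getElem?]
      have hlen2 : (rowL P n P.length).length = NN n := by simp [rowL]
      have hNn : NN n - 1 = n.toNat := by unfold NN; omega
      rw [hlen2, hNn]
      simp [rowL, List.getElem?_range (show n.toNat < NN n by unfold NN; omega)]
    rw [hlast2]
  | succ c ih =>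
    intro k DP hk hlen hrow hrest
    have hkP : k < P.length := by omega
    rw [PySem.List.pyRange_one_cons (by omega : (k : Int) + 1 < n + 1)]
    simp only [outerLoop]
    have hxlen : (((List.replicate (NN n) (0 : Int)).length : ℕ) : Int) = n + 1 := by
      simp [NN]; omega
    rw [hxlen]
    have hcast : ((k : Int) + 1) = ((k + 1 : ℕ) : Int) := by push_cast; ring
    rw [hcast]
    have hfill := rowLoop_fill P n n (k + 1) (by omega) (by omega) HP2 n.toNat 1 DP
      (by omega) (by omega) hlen
      (by rw [Nat.add_sub_cancel]; exact hrow)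
      (by rw [show ((1 : Int)).toNat = 1 from rfl, mixRow_one P n HP2 (k + 1)]
          exact hrest (k + 1) (by omega) (by omega))
    rw [hfill]
    have hcast2 : ((k + 1 : ℕ) : Int) + 1 = (((k + 1 : ℕ) : ℕ) : Int) + 1 := rfl
    have := ih (k + 1) (DP.set (k + 1) (rowL P n (k + 1)))
      (by omega) (by simp [hlen])
      (by rw [List.getElem?_set_self (by omega : k + 1 < DP.length)])
      (by intro t ht1 ht2
          rw [List.getElem?_set_ne (by omega : k + 1 ≠ t)]
          exact hrest t (by omega) ht2)
    exact this

-- ---- find_primes facts ----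
theorem fpInner_true_iff (i : Int) : ∀ js, fpInner i js = true ↔ ∀ j ∈ js, PySem.Int.mod i j ≠ 0 := by
  intro js
  induction js with
  | nil => simp [fpInner]
  | cons j js ih =>
    simp only [fpInner]
    by_cases h : PySem.Int.mod i j = 0
    · rw [if_pos (by simp [h])]
      constructor
      · intro hh; exact absurd hh (by simp)
      · intro hall; exact absurd h (hall j (List.mem_cons_self ..))
    · rw [if_neg (by simp [h]), ih]
      constructor
      · intro hall j' hj'
        rcases List.mem_cons.mp hj' with rfl | hj'
        · exact h
        · exact hall j' hj'
      · intro hall j' hj'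
        exact hall j' (List.mem_cons_of_mem _ hj')

theorem find_primes_eq (n : Int) :
    find_primes n = (PySem.List.pyRange 2 (n + 1) 1).filter
      (fun i => fpInner i (PySem.List.pyRange 2 i 1)) := by
  unfold find_primes
  have h := PySem.List.foldl_append_if
    (fun i => fpInner i (PySem.List.pyRange 2 i 1)) (id : Int → Int)
    (PySem.List.pyRange 2 (n + 1) 1) []
  simpa using h

theorem trial_iff (i : Int) (h2 : 2 ≤ i) :
    (∀ j, 2 ≤ j → j < i → ¬ j ∣ i) ↔ Nat.Prime i.toNat := by
  constructor
  · intro h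
    rw [Nat.prime_def_lt]
    refine ⟨by omega, ?_⟩
    intro m hm hdvd
    by_contra hne
    rcases Nat.eq_zero_or_pos m with h0 | h1
    · subst h0
      rw [Nat.zero_dvd] at hdvd
      omega
    · have hm2 : 2 ≤ m := by omega
      apply h (m : Int) (by omega) (by omega)
      have hd : (m : Int) ∣ (i.toNat : Int) := Int.natCast_dvd_natCast.mpr hdvd
      rwa [Int.toNat_of_nonneg (by omega)] at hd
  · intro hp j hj2 hji hdvd
    have hdn : j.toNat ∣ i.toNat := by
      have hj := Int.toNat_of_nonneg (show (0 : Int) ≤ j by omega)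
      have hi := Int.toNat_of_nonneg (show (0 : Int) ≤ i by omega)
      rw [← hj, ← hi] at hdvd
      exact Int.natCast_dvd_natCast.mp hdvd
    have := (Nat.prime_def_lt.mp hp).2 j.toNat (by omega) hdn
    omega

theorem mem_find_primes (n m : Int) :
    m ∈ find_primes n ↔ 2 ≤ m ∧ m ≤ n ∧ Nat.Prime m.toNat := by
  rw [find_primes_eq, List.mem_filter]
  constructor
  · rintro ⟨hmem, hfp⟩
    rw [PySem.List.mem_pyRange_one] at hmem
    refine ⟨hmem.1, by omega, ?_⟩
    apply (trial_iff m hmem.1).mp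
    intro j hj2 hji hdvd
    have hj := (fpInner_true_iff m _).mp hfp j
      (by rw [PySem.List.mem_pyRange_one]; exact ⟨hj2, hji⟩)
    exact hj ((PySem.Int.mod_eq_zero_iff_dvd m j).mpr hdvd)
  · rintro ⟨h2, hle, hp⟩
    refine ⟨by rw [PySem.List.mem_pyRange_one]; omega, ?_⟩
    rw [fpInner_true_iff]
    intro j hj hmod
    rw [PySem.List.mem_pyRange_one] at hj
    exact (trial_iff m h2).mpr hp j hj.1 hj.2 ((PySem.Int.mod_eq_zero_iff_dvd m j).mp hmod)

theorem find_primes_pairwise (n : Int) : (find_primes n).Pairwise (· < ·) := by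
  rw [find_primes_eq]
  exact List.Pairwise.sublist List.filter_sublist (PySem.List.pairwise_lt_pyRange_one 2 (n + 1))

theorem find_primes_length_le (n : Int) (hn : 2 ≤ n) :
    ((find_primes n).length : Int) ≤ n - 1 := by
  rw [find_primes_eq]
  have h1 := List.length_filter_le
    (fun i => fpInner i (PySem.List.pyRange 2 i 1)) (PySem.List.pyRange 2 (n + 1) 1)
  have h2 := PySem.List.length_pyRange_one 2 (n + 1)
  omega

theorem le_getLast_of_sorted (l : List Int) (hl : l.Pairwise (· < ·)) (hne : l ≠ [])
    (x : Int) (hx : x ∈ l) : x ≤ l.getLast hne := by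
  have hsplit := List.dropLast_append_getLast hne
  rw [← hsplit] at hx hl
  rcases List.mem_append.mp hx with h | h
  · rcases List.pairwise_append.mp hl with ⟨-, -, hlt⟩
    exact le_of_lt (hlt x h _ (by simp))
  · simp only [List.mem_singleton] at h
    omega

theorem sorted_subset_sublist : ∀ (t s : List Int), s.Pairwise (· < ·) → t.Pairwise (· < ·) →
    (∀ x ∈ s, x ∈ t) → s.Sublist t := by
  intro t
  induction t with
  | nil =>
    intro s hs ht hsub
    cases s with
    | nil => exact List.Sublist.refl _
    | cons a s' => exact absurd (hsub a (by simp)) (by simp)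
  | cons b t' ih =>
    intro s hs ht hsub
    cases s with
    | nil => exact List.nil_sublist _
    | cons a s' =>
      rcases List.pairwise_cons.mp ht with ⟨hbt, ht'⟩
      rcases List.pairwise_cons.mp hs with ⟨has, hs'⟩
      by_cases hab : a = b
      · subst hab
        apply List.Sublist.cons₂
        apply ih s' hs' ht'
        intro x hx
        have hxt : x ∈ a :: t' := hsub x (List.mem_cons_of_mem _ hx)
        rcases List.mem_cons.mp hxt with rfl | h
        · exact absurd (has x hx) (lt_irrefl _)
        · exact h
      · apply List.Sublist.cons
        apply ih (a :: s') hs ht'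
        intro x hx
        have hxt := hsub x hx
        rcases List.mem_cons.mp hxt with rfl | h
        · have hat : a ∈ t' := by
            rcases List.mem_cons.mp (hsub a (by simp)) with rfl | h2
            · exact absurd rfl hab
            · exact h2
          have hba : x < a := hbt a hat
          rcases List.mem_cons.mp hx with rfl | hxs
          · exact absurd hba (lt_irrefl _)
          · have := has x hxs
            omega
        · exact h

-- ---- characterization of A's port ----
theorem rowL_zero (P : List Int) (n : Int) : rowL P n 0 = List.replicate (NN n) 0 := by
  rw [List.eq_replicate_iff]
  constructor
  · simp [rowL]
  · intro b hb
    rcases List.mem_map.mp hb with ⟨j, -, rfl⟩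
    simp [Efun]

theorem foldl_const_append (x : List Int) :
    ∀ (l : List Int) (acc : List (List Int)),
      l.foldl (fun d (_ : Int) => d ++ [x]) acc = acc ++ List.replicate l.length x := by
  intro l
  induction l with
  | nil => intro acc; simp
  | cons a l ih =>
    intro acc
    rw [List.foldl_cons, ih, List.length_cons, List.replicate_succ]
    simp

theorem main_compute (Q : List Int) (n : Int) (hn : 2 ≤ n) (hQ2 : ∀ p ∈ Q, 2 ≤ p)
    (hQlen : (Q.length : Int) + 1 ≤ n) :
    ((outerLoop Q n (List.replicate (n + 1).toNat 0)
        ((PySem.List.pyRange 0 ((Q.length : Int) + 1) 1).foldl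
          (fun d _ => d ++ [List.replicate (n + 1).toNat 0]) [])
        (PySem.List.pyRange 1 (n + 1) 1)).getD false) = (Efun Q Q.length n.toNat == n) := by
  have hxNN : List.replicate (n + 1).toNat (0 : Int) = List.replicate (NN n) 0 := rfl
  have hDP : (PySem.List.pyRange 0 ((Q.length : Int) + 1) 1).foldl
      (fun d _ => d ++ [List.replicate (n + 1).toNat (0 : Int)]) [] =
      List.replicate (Q.length + 1) (List.replicate (NN n) 0) := by
    rw [hxNN, foldl_const_append, List.nil_append, PySem.List.length_pyRange_one]
    congr 1
  rw [hDP, hxNN]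
  have hof := outer_fill Q n hQ2 hn hQlen Q.length 0
    (List.replicate (Q.length + 1) (List.replicate (NN n) 0)) (by omega)
    (by simp)
    (by rw [List.getElem?_replicate, if_pos (by omega), rowL_zero])
    (by intro t ht1 ht2
        rw [List.getElem?_replicate, if_pos (by omega), rowL_zero])
  simp only [Nat.cast_zero, zero_add] at hof
  rw [hof]
  rfl

theorem two_primes_char (n : Int) (hn : 2 ≤ n) :
    ∃ Q : List Int, (∀ m, m ∈ Q ↔ 2 ≤ m ∧ m < n ∧ Nat.Prime m.toNat) ∧ Q.Pairwise (· < ·) ∧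
      two_primes n = (Efun Q Q.length n.toNat == n) := by
  have h2mem : (2 : Int) ∈ find_primes n := (mem_find_primes n 2).mpr ⟨le_refl _, hn, by decide⟩
  have hne : find_primes n ≠ [] := by
    intro h
    rw [h] at h2mem
    exact absurd h2mem (by simp)
  have hpw := find_primes_pairwise n
  have hlenF := find_primes_length_le n hn
  have hlast : (find_primes n).getLast? = some ((find_primes n).getLast hne) :=
    List.getLast?_eq_some_getLast hne
  have hlastmem : (find_primes n).getLast hne ∈ find_primes n := List.mem_of_getLast? hlast
  have hlastle : (find_primes n).getLast hne ≤ n := ((mem_find_primes n _).mp hlastmem).2.1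
  have hmax : ∀ x ∈ find_primes n, x ≤ (find_primes n).getLast hne :=
    fun x hx => le_getLast_of_sorted _ hpw hne x hx
  simp only [two_primes]
  rw [PySem.List.pyGet?_neg_one, hlast]
  dsimp only
  by_cases hln : (find_primes n).getLast hne = n
  · -- n itself is prime and is the last element: it is deleted
    have hsplit := List.dropLast_append_getLast hne
    refine ⟨(find_primes n).dropLast, ?_, ?_, ?_⟩
    · intro m
      constructor
      · intro hm
        have hmF := List.mem_of_mem_dropLast hm
        obtain ⟨h2, hle, hp⟩ := (mem_find_primes n m).mp hmF
        refine ⟨h2, ?_, hp⟩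
        have hpwsplit := hpw
        rw [← hsplit] at hpwsplit
        rcases List.pairwise_append.mp hpwsplit with ⟨-, -, hlt⟩
        have := hlt m hm ((find_primes n).getLast hne) (List.mem_singleton_self _)
        omega
      · rintro ⟨h2, hlt, hp⟩
        have hmF : m ∈ find_primes n := (mem_find_primes n m).mpr ⟨h2, by omega, hp⟩
        rw [← hsplit] at hmF
        rcases List.mem_append.mp hmF with h | h
        · exact h
        · simp only [List.mem_singleton] at h
          omega
    · exact List.Pairwise.sublist (List.dropLast_sublist _) hpw
    · rw [if_pos (by simp [hln])]
      have hQ2 : ∀ p ∈ (find_primes n).dropLast, 2 ≤ p := fun p hp =>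
        ((mem_find_primes n p).mp (List.mem_of_mem_dropLast hp)).1
      have hQlen : (((find_primes n).dropLast.length : ℕ) : Int) + 1 ≤ n := by
        have := List.length_dropLast (xs := find_primes n)
        omega
      exact main_compute _ n hn hQ2 hQlen
  · -- the last (largest) prime is < n: nothing is deleted
    have hlastlt : (find_primes n).getLast hne < n := by omega
    refine ⟨find_primes n, ?_, hpw, ?_⟩
    · intro m
      constructor
      · intro hm
        obtain ⟨h2, hle, hp⟩ := (mem_find_primes n m).mp hm
        have := hmax m hm
        exact ⟨h2, by omega, hp⟩
      · rintro ⟨h2, hlt, hp⟩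
        exact (mem_find_primes n m).mpr ⟨h2, by omega, hp⟩
    · rw [if_neg (by simp [hln])]
      have hQ2 : ∀ p ∈ find_primes n, 2 ≤ p := fun p hp =>
        ((mem_find_primes n p).mp hp).1
      exact main_compute _ n hn hQ2 (by omega)

-- ---- Richert's theorem ----
def NRepr (P m : ℕ) : Prop := ∃ l : List ℕ, l.Pairwise (· < ·) ∧
  (∀ p ∈ l, p.Prime ∧ p ≤ P ∧ p < m) ∧ l.sum = m

def NGood (P b : ℕ) : Prop := Nat.Prime P ∧ 2 * P + 11 ≤ b ∧ ∀ m, 12 ≤ m → m ≤ b → NRepr P m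

theorem ngood_base : NGood 19 49 := by
  refine ⟨by norm_num, by norm_num, ?_⟩
  intro m h12 h49
  interval_cases m
  · exact ⟨[5, 7], by decide, by decide, by decide⟩
  · exact ⟨[2, 11], by decide, by decide, by decide⟩
  · exact ⟨[3, 11], by decide, by decide, by decide⟩
  · exact ⟨[2, 13], by decide, by decide, by decide⟩
  · exact ⟨[3, 13], by decide, by decide, by decide⟩
  · exact ⟨[2, 3, 5, 7], by decide, by decide, by decide⟩
  · exact ⟨[5, 13], by decide, by decide, by decide⟩
  · exact ⟨[3, 5, 11], by decide, by decide, by decide⟩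
  · exact ⟨[7, 13], by decide, by decide, by decide⟩
  · exact ⟨[3, 5, 13], by decide, by decide, by decide⟩
  · exact ⟨[2, 7, 13], by decide, by decide, by decide⟩
  · exact ⟨[3, 7, 13], by decide, by decide, by decide⟩
  · exact ⟨[11, 13], by decide, by decide, by decide⟩
  · exact ⟨[5, 7, 13], by decide, by decide, by decide⟩
  · exact ⟨[2, 11, 13], by decide, by decide, by decide⟩
  · exact ⟨[3, 11, 13], by decide, by decide, by decide⟩
  · exact ⟨[3, 5, 7, 13], by decide, by decide, by decide⟩
  · exact ⟨[5, 11, 13], by decide, by decide, by decide⟩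
  · exact ⟨[2, 3, 5, 7, 13], by decide, by decide, by decide⟩
  · exact ⟨[7, 11, 13], by decide, by decide, by decide⟩
  · exact ⟨[3, 5, 11, 13], by decide, by decide, by decide⟩
  · exact ⟨[2, 7, 11, 13], by decide, by decide, by decide⟩
  · exact ⟨[3, 7, 11, 13], by decide, by decide, by decide⟩
  · exact ⟨[3, 13, 19], by decide, by decide, by decide⟩
  · exact ⟨[17, 19], by decide, by decide, by decide⟩
  · exact ⟨[7, 11, 19], by decide, by decide, by decide⟩
  · exact ⟨[2, 17, 19], by decide, by decide, by decide⟩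
  · exact ⟨[3, 17, 19], by decide, by decide, by decide⟩
  · exact ⟨[3, 7, 11, 19], by decide, by decide, by decide⟩
  · exact ⟨[2, 3, 17, 19], by decide, by decide, by decide⟩
  · exact ⟨[2, 5, 7, 11, 17], by decide, by decide, by decide⟩
  · exact ⟨[7, 17, 19], by decide, by decide, by decide⟩
  · exact ⟨[3, 5, 17, 19], by decide, by decide, by decide⟩
  · exact ⟨[2, 7, 17, 19], by decide, by decide, by decide⟩
  · exact ⟨[2, 3, 5, 17, 19], by decide, by decide, by decide⟩
  · exact ⟨[11, 17, 19], by decide, by decide, by decide⟩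
  · exact ⟨[2, 3, 7, 17, 19], by decide, by decide, by decide⟩
  · exact ⟨[2, 11, 17, 19], by decide, by decide, by decide⟩

theorem ngood_step (P b : ℕ) (h : NGood P b) : ∃ q, NGood q (b + q) ∧ b + 1 ≤ b + q := by
  obtain ⟨hP, hb, hrep⟩ := h
  obtain ⟨q, hq, hPq, hq2P⟩ := Nat.bertrand P hP.pos.ne'
  refine ⟨q, ⟨hq, by omega, ?_⟩, by have := hq.two_le; omega⟩
  intro m h12 hmb
  by_cases hm : m ≤ b
  · obtain ⟨l, hl1, hl2, hl3⟩ := hrep m h12 hm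
    exact ⟨l, hl1, fun p hp =>
      ⟨(hl2 p hp).1, by have := (hl2 p hp).2.1; omega, (hl2 p hp).2.2⟩, hl3⟩
  · obtain ⟨l, hl1, hl2, hl3⟩ := hrep (m - q) (by omega) (by omega)
    refine ⟨l ++ [q], ?_, ?_, ?_⟩
    · rw [List.pairwise_append]
      refine ⟨hl1, List.pairwise_singleton _ _, ?_⟩
      intro a ha b' hb'
      simp only [List.mem_singleton] at hb'
      subst hb'
      have := (hl2 a ha).2.1
      omega
    · intro p hp
      rcases List.mem_append.mp hp with hp | hp
      · obtain ⟨h1, h2', h3⟩ := hl2 p hp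
        exact ⟨h1, by omega, by omega⟩
      · simp only [List.mem_singleton] at hp
        subst hp
        exact ⟨hq, le_refl _, by omega⟩
    · rw [List.sum_append]
      simp
      omega

theorem exists_good : ∀ n : ℕ, ∃ P b, NGood P b ∧ n ≤ b := by
  intro n
  induction n with
  | zero => exact ⟨19, 49, ngood_base, by omega⟩
  | succ n ih =>
    obtain ⟨P, b, hg, hle⟩ := ih
    by_cases h : n + 1 ≤ b
    · exact ⟨P, b, hg, h⟩
    · obtain ⟨q, hg', hb'⟩ := ngood_step P b hg
      exact ⟨q, b + q, hg', by omega⟩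

theorem richertN (m : ℕ) (hm : 12 ≤ m) :
    ∃ l : List ℕ, l.Pairwise (· < ·) ∧ (∀ p ∈ l, p.Prime ∧ p < m) ∧ l.sum = m := by
  obtain ⟨P, b, ⟨hP, hb, hrep⟩, hle⟩ := exists_good m
  obtain ⟨l, h1, h2, h3⟩ := hrep m hm hle
  exact ⟨l, h1, fun p hp => ⟨(h2 p hp).1, (h2 p hp).2.2⟩, h3⟩

-- ---- assembly ----
theorem two_primes_big (n : Int) (hn : 12 ≤ n) : two_primes n = true := by
  obtain ⟨Q, hmem, hpw, heq⟩ := two_primes_char n (by omega)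
  rw [heq]
  have hQ2 : ∀ p ∈ Q, 2 ≤ p := fun p hp => ((hmem p).mp hp).1
  obtain ⟨l, hl1, hl2, hl3⟩ := richertN n.toNat (by omega)
  have hSsorted : (l.map (Nat.cast : ℕ → ℤ)).Pairwise (· < ·) := by
    rw [List.pairwise_map]
    exact hl1.imp (fun h => by exact_mod_cast h)
  have hSsub : ∀ x ∈ l.map (Nat.cast : ℕ → ℤ), x ∈ Q := by
    intro x hx
    rcases List.mem_map.mp hx with ⟨p, hp, rfl⟩
    obtain ⟨hprime, hlt⟩ := hl2 p hp
    apply (hmem _).mpr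
    refine ⟨by exact_mod_cast hprime.two_le, by omega, ?_⟩
    simpa using hprime
  have hsub : (l.map (Nat.cast : ℕ → ℤ)).Sublist Q :=
    sorted_subset_sublist Q _ hSsorted hpw hSsub
  have hsum : (l.map (Nat.cast : ℕ → ℤ)).sum = n := by
    rw [← Nat.cast_list_sum, hl3, Int.toNat_of_nonneg (by omega)]
  have hge := Efun_ge_sum Q hQ2 Q.length (l.map (Nat.cast : ℕ → ℤ)) n.toNat
    (by rw [List.take_length]; exact hsub) (by rw [hsum]; omega)
  have hub := Efun_le Q Q.length n.toNat
  have hEq : Efun Q Q.length n.toNat = n := by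
    rw [hsum] at hge
    omega
  rw [hEq]
  simp

-- ===== VERDICT (by name: the statement is the Claim_ definition above) =====
set_option maxRecDepth 8000 in
theorem two_primes_spec : Claim_equal_two_primes := by
  intro number hdom hpre
  unfold Pre_two_primes at hpre
  unfold Spec_two_primes
  by_cases hbig : 12 ≤ number
  · rw [two_primes_big number hbig]
    simp [two_primes_alt, hbig]
  · have h : number = 2 ∨ number = 3 ∨ number = 4 ∨ number = 5 ∨ number = 6 ∨
        number = 7 ∨ number = 8 ∨ number = 9 ∨ number = 10 ∨ number = 11 := by omega
    rcases h with rfl | rfl | rfl | rfl | rfl | rfl | rfl | rfl | rfl | rfl <;> decide
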